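-- pv_equiv track=rewrite | github.com/FennexFox/AIFFEL_codingtest | Programmers Lv0/문자열 바꿔서 찾기.py | solution
-- ===== SOURCE A (Python) =====
-- def solution(myString, pat):
--     answer = 0
--     test_string = ""
--
--     for letter in myString:
--         if letter == "A":
--             test_string += "B"
--         elif letter == "B":
--             test_string += "A"
--         else:
--             test_string += letter
--
--     if pat in test_string:
--         answer = 1
--
--     return answer
-- ===== SOURCE B (Python) =====
-- def _swap(c):
--     return {'A': 'B', 'B': 'A'}.get(c, c)
--
-- def solution(myString, pat):
--     # A/B-swapping is an involution, so "pat occurs in swapped(myString)"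
--     # is equivalent to "swapped(pat) occurs in myString": transform the
--     # (usually short) pattern once and search the original string untouched.
--     swapped_pat = ''.join(_swap(c) for c in pat)
--     return int(swapped_pat in myString)
-- ===== Notes on version B (the rewrite author's own statement) =====
-- stated objective: alternative
-- what changed: B never builds a transformed copy of myString: since the A/B swap is an involution, it swaps the pattern instead (O(m) work) and searches the original string, whereas A rebuilds the whole text character by character before searching.
import Mathlib
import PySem

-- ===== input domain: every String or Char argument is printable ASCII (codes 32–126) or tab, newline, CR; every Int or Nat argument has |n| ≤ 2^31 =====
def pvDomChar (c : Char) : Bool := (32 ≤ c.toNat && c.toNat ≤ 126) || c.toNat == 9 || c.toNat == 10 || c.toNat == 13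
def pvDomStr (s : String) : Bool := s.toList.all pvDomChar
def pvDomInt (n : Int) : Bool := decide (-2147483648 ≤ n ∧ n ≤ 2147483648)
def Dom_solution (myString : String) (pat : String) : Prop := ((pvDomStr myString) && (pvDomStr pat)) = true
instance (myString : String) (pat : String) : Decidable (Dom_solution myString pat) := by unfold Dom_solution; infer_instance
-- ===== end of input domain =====

-- ===== PORT A =====
-- B swaps the (short) pattern instead of rebuilding the whole text (A/B-swap is an involution); alternative algorithm, same search cost.
def solution (myString : String) (pat : String) : Int :=
  let test_string : String :=
    myString.toList.foldl
      (fun acc letter =>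
        if letter = 'A' then acc ++ "B"
        else if letter = 'B' then acc ++ "A"
        else acc ++ String.ofList [letter]) ""
  if PySem.Str.isIn pat test_string then 1 else 0

-- ===== PORT B =====
-- _swap(c) = {'A':'B','B':'A'}.get(c, c)
def pvSwap (c : Char) : Char :=
  (PySem.Dict.ofList [('A', 'B'), ('B', 'A')]).getD c c

def solution_alt (myString : String) (pat : String) : Int :=
  let swapped_pat : String := String.ofList (pat.toList.map pvSwap)
  if PySem.Str.isIn swapped_pat myString then 1 else 0

-- ===== PRECONDITION & SPEC =====
def Spec_solution (myString : String) (pat : String) (out : Int) : Prop := out = solution_alt myString pat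
instance (myString : String) (pat : String) (out : Int) : Decidable (Spec_solution myString pat out) := by unfold Spec_solution; infer_instance

-- ===== CLAIM =====
def Claim_equal_solution : Prop := ∀ (myString : String) (pat : String), Dom_solution myString pat → Spec_solution myString pat (solution myString pat)

-- ===== LEMMAS AND PROOFS =====

theorem pvSwap_eq (c : Char) :
    pvSwap c = if c = 'A' then 'B' else if c = 'B' then 'A' else c := by
  by_cases h1 : c = 'A'
  · subst h1; decide
  · by_cases h2 : c = 'B'
    · subst h2; decide
    · simp [pvSwap, PySem.Dict.ofList, PySem.Dict.empty, PySem.Dict.update,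
            PySem.Dict.getD_insert, h1, h2]
      rfl

theorem pvSwap_invol (c : Char) : pvSwap (pvSwap c) = c := by
  by_cases h1 : c = 'A'
  · subst h1; decide
  · by_cases h2 : c = 'B'
    · subst h2; decide
    · simp [pvSwap_eq, h1, h2]

theorem pvMap_swap_swap (l : List Char) : (l.map pvSwap).map pvSwap = l := by
  rw [List.map_map]
  have : (pvSwap ∘ pvSwap) = id := funext pvSwap_invol
  rw [this, List.map_id]

theorem pvTr_eq (c : Char) (acc : String) :
    (if c = 'A' then acc ++ "B" else if c = 'B' then acc ++ "A" else acc ++ String.ofList [c])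
      = acc ++ String.ofList [pvSwap c] := by
  split_ifs with h1 h2
  · simp [h1]; decide
  · simp [h2]; decide
  · simp [pvSwap_eq, h1, h2]

theorem pvFold_eq (l : List Char) (acc : String) :
    l.foldl
      (fun acc letter =>
        if letter = 'A' then acc ++ "B"
        else if letter = 'B' then acc ++ "A"
        else acc ++ String.ofList [letter]) acc
      = acc ++ String.ofList (l.map pvSwap) := by
  induction l generalizing acc with
  | nil => rw [List.map_nil, show String.ofList ([] : List Char) = "" from rfl, String.append_empty, List.foldl_nil]
  | cons c t ih =>
    rw [List.foldl_cons, pvTr_eq c acc, ih, String.append_assoc, ← String.ofList_append]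
    rfl

-- the involution trick: pat occurs in the swapped text iff the swapped pat occurs in the text
theorem pvInfix_swap (p s : List Char) : p <:+: s.map pvSwap ↔ p.map pvSwap <:+: s := by
  constructor
  · intro h
    have := h.map pvSwap
    rwa [pvMap_swap_swap] at this
  · intro h
    have := h.map pvSwap
    rwa [pvMap_swap_swap] at this

-- ===== VERDICT =====
theorem solution_spec : Claim_equal_solution := by
  intro myString pat _
  unfold Spec_solution solution solution_alt
  rw [pvFold_eq]
  simp only [PySem.Str.isIn_iff_infix]
  have hl : (String.ofList (myString.toList.map pvSwap)).toList = myString.toList.map pvSwap := by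
    simp
  have hp : (String.ofList (pat.toList.map pvSwap)).toList = pat.toList.map pvSwap := by
    simp
  rw [show ("" : String) ++ String.ofList (myString.toList.map pvSwap) = String.ofList (myString.toList.map pvSwap) from by simp,
      hl, hp]
  by_cases h : pat.toList <:+: myString.toList.map pvSwap
  · rw [if_pos h, if_pos ((pvInfix_swap _ _).mp h)]
  · rw [if_neg h, if_neg (fun hc => h ((pvInfix_swap _ _).mpr hc))]
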